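-- pv_equiv track=rewrite | github.com/stolostron/acm-ai-qe | apps/z-stream-analysis/src/services/jenkins_intelligence_service.py | _extract_environment_info
-- ===== SOURCE A (Python) =====
-- from typing import Dict, Any, List, Optional, Tuple
--
-- def _extract_environment_info(parameters: Dict[str, Any]) -> Dict[str, Any]:
--     """Extract environment information from build parameters"""
--     env_info = {
--         'cluster_name': None,
--         'environment_type': None,
--         'target_branch': None,
--         'test_suite': None
--     }
--
--     # Common parameter names for cluster information
--     cluster_params = ['CLUSTER_NAME', 'cluster', 'environment', 'ENVIRONMENT']
--     for param in cluster_params: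
--         if param in parameters:
--             env_info['cluster_name'] = parameters[param]
--             break
--
--     # Branch information
--     branch_params = ['BRANCH', 'branch', 'GIT_BRANCH', 'git_branch']
--     for param in branch_params:
--         if param in parameters:
--             env_info['target_branch'] = parameters[param]
--             break
--
--     # Test suite information
--     suite_params = ['TEST_SUITE', 'test_suite', 'SUITE']
--     for param in suite_params:
--         if param in parameters:
--             env_info['test_suite'] = parameters[param]
--             break
--
--     return env_info
-- ===== SOURCE B (Python) =====
-- def _extract_environment_info(parameters):
--     """Extract environment information from build parameters"""
--     # Inverted index: candidate parameter name -> (output field, priority rank)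
--     priority = {}
--     for field, keys in (
--         ('cluster_name', ('CLUSTER_NAME', 'cluster', 'environment', 'ENVIRONMENT')),
--         ('target_branch', ('BRANCH', 'branch', 'GIT_BRANCH', 'git_branch')),
--         ('test_suite', ('TEST_SUITE', 'test_suite', 'SUITE')),
--     ):
--         for rank, key in enumerate(keys):
--             priority[key] = (field, rank)
--     # Single pass over the actual parameters, keeping the lowest-rank hit per field
--     best = {}
--     for key in parameters:
--         hit = priority.get(key)
--         if hit is not None:
--             field, rank = hit
--             if field not in best or rank < best[field][1]:
--                 best[field] = (key, rank)
--     return {f: parameters[best[f][0]] if f in best else None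
--             for f in ('cluster_name', 'environment_type', 'target_branch', 'test_suite')}
-- ===== Notes on version B (the rewrite author's own statement) =====
-- stated objective: alternative
-- what changed: Instead of scanning candidate-key lists against the dict per field, B builds an inverted index key->(field,rank) once and makes a single pass over the actual parameters, keeping the lowest-rank hit per field.
import Mathlib
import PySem

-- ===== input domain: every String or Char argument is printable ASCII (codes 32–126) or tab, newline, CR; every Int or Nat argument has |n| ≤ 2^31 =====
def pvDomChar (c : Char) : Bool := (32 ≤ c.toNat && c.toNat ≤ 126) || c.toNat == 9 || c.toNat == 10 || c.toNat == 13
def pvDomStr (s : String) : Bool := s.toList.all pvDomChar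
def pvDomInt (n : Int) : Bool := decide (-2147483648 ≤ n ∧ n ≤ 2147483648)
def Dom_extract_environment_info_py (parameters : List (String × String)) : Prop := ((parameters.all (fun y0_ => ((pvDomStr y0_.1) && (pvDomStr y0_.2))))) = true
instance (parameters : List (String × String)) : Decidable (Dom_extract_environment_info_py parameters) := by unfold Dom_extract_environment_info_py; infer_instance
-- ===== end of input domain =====

-- B replaces A's per-field candidate scans by an inverted key->(field,rank) index and one pass
-- over the parameters themselves, keeping the lowest-rank hit per field (objective: alternative).

-- ===== PORT A =====
-- A: three unrolled candidate-key loops, each assigning the first present key's value and breaking.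
-- 'if param in parameters: env[field] = parameters[param]; break' over one candidate list:
def pvLoopA (d : PySem.Dict String String) (env : PySem.Dict String (Option String))
    (field : String) : List String → PySem.Dict String (Option String)
  | [] => env
  | p :: rest =>
      if d.contains p then env.insert field (d.get? p) else pvLoopA d env field rest

def extract_environment_info_py (parameters : List (String × String)) : List (String × Option String) :=
  let d := PySem.Dict.ofList parameters
  let env : PySem.Dict String (Option String) :=
    ((((PySem.Dict.empty.insert "cluster_name" none).insert "environment_type" none).insert
        "target_branch" none).insert "test_suite" none)
  let env := pvLoopA d env "cluster_name" ["CLUSTER_NAME", "cluster", "environment", "ENVIRONMENT"]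
  let env := pvLoopA d env "target_branch" ["BRANCH", "branch", "GIT_BRANCH", "git_branch"]
  let env := pvLoopA d env "test_suite" ["TEST_SUITE", "test_suite", "SUITE"]
  env.items

-- ===== PORT B =====
-- B: inverted index key -> (field, rank), built once from the spec table:
def pvSpecB : List (String × List String) :=
  [("cluster_name", ["CLUSTER_NAME", "cluster", "environment", "ENVIRONMENT"]),
   ("target_branch", ["BRANCH", "branch", "GIT_BRANCH", "git_branch"]),
   ("test_suite", ["TEST_SUITE", "test_suite", "SUITE"])]

def pvPriority : PySem.Dict String (String × Int) :=
  pvSpecB.foldl (fun p fk =>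
    (PySem.List.enumerate fk.2).foldl (fun p rk => p.insert rk.2 (fk.1, rk.1)) p)
    PySem.Dict.empty

-- the body of B's 'for key in parameters' loop
def pvBestStep (best : PySem.Dict String (String × Int)) (key : String) :
    PySem.Dict String (String × Int) :=
  match pvPriority.get? key with
  | none => best
  | some fr =>
      match best.get? fr.1 with
      | none => best.insert fr.1 (key, fr.2)
      | some kr => if fr.2 < kr.2 then best.insert fr.1 (key, fr.2) else best

def extract_environment_info_py_alt (parameters : List (String × String)) : List (String × Option String) :=
  let d := PySem.Dict.ofList parameters
  let best := (PySem.Dict.keys d).foldl pvBestStep PySem.Dict.empty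
  -- 'parameters[best[f][0]] if f in best else None'; the stored key is present in d,
  -- so d.get? returns its value (KeyError impossible)
  ["cluster_name", "environment_type", "target_branch", "test_suite"].map
    (fun f => (f, match best.get? f with
                  | some kr => d.get? kr.1
                  | none => none))

-- ===== PRECONDITION & SPEC =====
def Spec_extract_environment_info_py (parameters : List (String × String)) (out : List (String × Option String)) : Prop := out = extract_environment_info_py_alt parameters
instance (parameters : List (String × String)) (out : List (String × Option String)) : Decidable (Spec_extract_environment_info_py parameters out) := by unfold Spec_extract_environment_info_py; infer_instance

-- ===== CLAIM (what is proved, stated in full; the proofs are below) =====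
def Claim_equal_extract_environment_info_py : Prop := ∀ (parameters : List (String × String)), Dom_extract_environment_info_py parameters → Spec_extract_environment_info_py parameters (extract_environment_info_py parameters)

-- ===== LEMMAS AND PROOFS =====

-- left-biased min by rank, the shape of B's 'rank < best[field][1]' update
def pvMerge : Option (String × Int) → Option (String × Int) → Option (String × Int)
  | x, none => x
  | none, some q => some q
  | some p, some q => if q.2 < p.2 then some q else some p

-- spec of B's single pass, projected to one field
def pvM (f : String) : List String → Option (String × Int)
  | [] => none
  | k :: ks =>
      match pvPriority.get? k with
      | none => pvM f ks
      | some fr => if fr.1 = f then pvMerge (some (k, fr.2)) (pvM f ks) else pvM f ks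

theorem pvMerge_none (x : Option (String × Int)) : pvMerge x none = x := by
  cases x <;> rfl

theorem pvMerge_assoc (x y z : Option (String × Int)) :
    pvMerge (pvMerge x y) z = pvMerge x (pvMerge y z) := by
  rcases x with _ | p <;> rcases y with _ | q <;> rcases z with _ | r <;>
    simp only [pvMerge] <;> (try split_ifs) <;>
    simp only [pvMerge] <;> (try split_ifs) <;> first | rfl | omega

theorem foldBest_get (ks : List String) (b : PySem.Dict String (String × Int)) (f : String) :
    (ks.foldl pvBestStep b).get? f = pvMerge (b.get? f) (pvM f ks) := by
  induction ks generalizing b with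
  | nil => simp [pvM, pvMerge_none]
  | cons k ks ih =>
      simp only [List.foldl_cons, ih]
      rcases h : pvPriority.get? k with _ | ⟨f', r⟩
      · simp [pvBestStep, h, pvM]
      · by_cases hf : f' = f
        · subst hf
          have hstep : (pvBestStep b k).get? f' = pvMerge (b.get? f') (some (k, r)) := by
            simp only [pvBestStep, h]
            rcases hb : b.get? f' with _ | kr
            · simp [pvMerge, PySem.Dict.get?_insert_self]
            · by_cases hlt : r < kr.2
              · simp [hlt, pvMerge, PySem.Dict.get?_insert_self]
              · simp [hb, hlt, pvMerge]
          rw [hstep, pvMerge_assoc]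
          simp [pvM, h]
        · have hstep : (pvBestStep b k).get? f = b.get? f := by
            simp only [pvBestStep, h]
            rcases hb : b.get? f' with _ | kr
            · simp only [hb]
              exact PySem.Dict.get?_insert_of_ne b _ (fun hc => hf hc.symm)
            · simp only [hb]
              by_cases hlt : r < kr.2
              · simp only [hlt, if_true]
                exact PySem.Dict.get?_insert_of_ne b _ (fun hc => hf hc.symm)
              · simp [hlt]
          rw [hstep]
          simp [pvM, h, hf]

theorem pvMerge_none_left (y : Option (String × Int)) : pvMerge none y = y := by
  cases y <;> rfl

theorem pvPriority_cases {k f : String} {r : Int} (h : pvPriority.get? k = some (f, r)) :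
    (k = "CLUSTER_NAME" ∧ f = "cluster_name" ∧ r = 0) ∨
    (k = "cluster" ∧ f = "cluster_name" ∧ r = 1) ∨
    (k = "environment" ∧ f = "cluster_name" ∧ r = 2) ∨
    (k = "ENVIRONMENT" ∧ f = "cluster_name" ∧ r = 3) ∨
    (k = "BRANCH" ∧ f = "target_branch" ∧ r = 0) ∨
    (k = "branch" ∧ f = "target_branch" ∧ r = 1) ∨
    (k = "GIT_BRANCH" ∧ f = "target_branch" ∧ r = 2) ∨
    (k = "git_branch" ∧ f = "target_branch" ∧ r = 3) ∨
    (k = "TEST_SUITE" ∧ f = "test_suite" ∧ r = 0) ∨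
    (k = "test_suite" ∧ f = "test_suite" ∧ r = 1) ∨
    (k = "SUITE" ∧ f = "test_suite" ∧ r = 2) := by
  have hm := PySem.Dict.mem_items_of_get?_eq_some _ h
  rw [show pvPriority.items = [("CLUSTER_NAME",("cluster_name",(0:Int))),("cluster",("cluster_name",1)),("environment",("cluster_name",2)),("ENVIRONMENT",("cluster_name",3)),("BRANCH",("target_branch",0)),("branch",("target_branch",1)),("GIT_BRANCH",("target_branch",2)),("git_branch",("target_branch",3)),("TEST_SUITE",("test_suite",0)),("test_suite",("test_suite",1)),("SUITE",("test_suite",2))] from rfl] at hm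
  simp only [List.mem_cons, List.not_mem_nil, or_false, Prod.mk.injEq] at hm
  tauto

theorem pvPriority_none {k : String} (h : pvPriority.get? k = none) :
    k ≠ "CLUSTER_NAME" ∧ k ≠ "cluster" ∧ k ≠ "environment" ∧ k ≠ "ENVIRONMENT" ∧
    k ≠ "BRANCH" ∧ k ≠ "branch" ∧ k ≠ "GIT_BRANCH" ∧ k ≠ "git_branch" ∧
    k ≠ "TEST_SUITE" ∧ k ≠ "test_suite" ∧ k ≠ "SUITE" := by
  have hm := (PySem.Dict.get?_eq_none_iff_not_mem_keys pvPriority k).mp h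
  rw [show pvPriority.keys = ["CLUSTER_NAME","cluster","environment","ENVIRONMENT","BRANCH","branch","GIT_BRANCH","git_branch","TEST_SUITE","test_suite","SUITE"] from rfl] at hm
  simp only [List.mem_cons, List.not_mem_nil, or_false, not_or] at hm
  exact hm

theorem pvM_cluster (ks : List String) :
    pvM "cluster_name" ks =
      if "CLUSTER_NAME" ∈ ks then some ("CLUSTER_NAME", 0)
      else if "cluster" ∈ ks then some ("cluster", 1)
      else if "environment" ∈ ks then some ("environment", 2)
      else if "ENVIRONMENT" ∈ ks then some ("ENVIRONMENT", 3)
      else none := by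
  induction ks with
  | nil => simp [pvM]
  | cons k ks ih =>
      rcases h : pvPriority.get? k with _ | ⟨f, r⟩
      · obtain ⟨n1, n2, n3, n4, -⟩ := pvPriority_none h
        simp [pvM, h, ih, List.mem_cons, Ne.symm n1, Ne.symm n2, Ne.symm n3, Ne.symm n4]
      · rcases pvPriority_cases h with ⟨rfl,rfl,rfl⟩|⟨rfl,rfl,rfl⟩|⟨rfl,rfl,rfl⟩|⟨rfl,rfl,rfl⟩|⟨rfl,rfl,rfl⟩|⟨rfl,rfl,rfl⟩|⟨rfl,rfl,rfl⟩|⟨rfl,rfl,rfl⟩|⟨rfl,rfl,rfl⟩|⟨rfl,rfl,rfl⟩|⟨rfl,rfl,rfl⟩ <;>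
          simp [pvM, h, ih, List.mem_cons] <;> split_ifs <;> simp [pvMerge]

theorem pvM_branch (ks : List String) :
    pvM "target_branch" ks =
      if "BRANCH" ∈ ks then some ("BRANCH", 0)
      else if "branch" ∈ ks then some ("branch", 1)
      else if "GIT_BRANCH" ∈ ks then some ("GIT_BRANCH", 2)
      else if "git_branch" ∈ ks then some ("git_branch", 3)
      else none := by
  induction ks with
  | nil => simp [pvM]
  | cons k ks ih =>
      rcases h : pvPriority.get? k with _ | ⟨f, r⟩
      · obtain ⟨-, -, -, -, n1, n2, n3, n4, -⟩ := pvPriority_none h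
        simp [pvM, h, ih, List.mem_cons, Ne.symm n1, Ne.symm n2, Ne.symm n3, Ne.symm n4]
      · rcases pvPriority_cases h with ⟨rfl,rfl,rfl⟩|⟨rfl,rfl,rfl⟩|⟨rfl,rfl,rfl⟩|⟨rfl,rfl,rfl⟩|⟨rfl,rfl,rfl⟩|⟨rfl,rfl,rfl⟩|⟨rfl,rfl,rfl⟩|⟨rfl,rfl,rfl⟩|⟨rfl,rfl,rfl⟩|⟨rfl,rfl,rfl⟩|⟨rfl,rfl,rfl⟩ <;>
          simp [pvM, h, ih, List.mem_cons] <;> split_ifs <;> simp [pvMerge]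

theorem pvM_suite (ks : List String) :
    pvM "test_suite" ks =
      if "TEST_SUITE" ∈ ks then some ("TEST_SUITE", 0)
      else if "test_suite" ∈ ks then some ("test_suite", 1)
      else if "SUITE" ∈ ks then some ("SUITE", 2)
      else none := by
  induction ks with
  | nil => simp [pvM]
  | cons k ks ih =>
      rcases h : pvPriority.get? k with _ | ⟨f, r⟩
      · obtain ⟨-, -, -, -, -, -, -, -, n1, n2, n3⟩ := pvPriority_none h
        simp [pvM, h, ih, List.mem_cons, Ne.symm n1, Ne.symm n2, Ne.symm n3]
      · rcases pvPriority_cases h with ⟨rfl,rfl,rfl⟩|⟨rfl,rfl,rfl⟩|⟨rfl,rfl,rfl⟩|⟨rfl,rfl,rfl⟩|⟨rfl,rfl,rfl⟩|⟨rfl,rfl,rfl⟩|⟨rfl,rfl,rfl⟩|⟨rfl,rfl,rfl⟩|⟨rfl,rfl,rfl⟩|⟨rfl,rfl,rfl⟩|⟨rfl,rfl,rfl⟩ <;>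
          simp [pvM, h, ih, List.mem_cons] <;> split_ifs <;> simp [pvMerge]

theorem pvM_envtype (ks : List String) : pvM "environment_type" ks = none := by
  induction ks with
  | nil => simp [pvM]
  | cons k ks ih =>
      rcases h : pvPriority.get? k with _ | ⟨f, r⟩
      · simp [pvM, h, ih]
      · rcases pvPriority_cases h with ⟨rfl,rfl,rfl⟩|⟨rfl,rfl,rfl⟩|⟨rfl,rfl,rfl⟩|⟨rfl,rfl,rfl⟩|⟨rfl,rfl,rfl⟩|⟨rfl,rfl,rfl⟩|⟨rfl,rfl,rfl⟩|⟨rfl,rfl,rfl⟩|⟨rfl,rfl,rfl⟩|⟨rfl,rfl,rfl⟩|⟨rfl,rfl,rfl⟩ <;>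
          simp [pvM, h, ih]

theorem pvLoopA_eq (d : PySem.Dict String String) (env : PySem.Dict String (Option String))
    (field : String) (keys : List String) :
    pvLoopA d env field keys =
      match (keys.filter (fun k => d.contains k)).head? with
      | none => env
      | some k => env.insert field (d.get? k) := by
  induction keys with
  | nil => rfl
  | cons p rest ih =>
      by_cases h : d.contains p = true
      · simp [pvLoopA, h, List.filter]
      · simp only [Bool.not_eq_true] at h
        simp [pvLoopA, h, List.filter, ih]

theorem valA_cluster (d : PySem.Dict String String) :
    ((["CLUSTER_NAME", "cluster", "environment", "ENVIRONMENT"].filter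
        (fun k => d.contains k)).head?).bind d.get? =
      (match pvM "cluster_name" d.keys with
       | some kr => d.get? kr.1
       | none => none) := by
  rw [pvM_cluster]
  by_cases h1 : "CLUSTER_NAME" ∈ d.keys <;> by_cases h2 : "cluster" ∈ d.keys <;>
    by_cases h3 : "environment" ∈ d.keys <;> by_cases h4 : "ENVIRONMENT" ∈ d.keys <;>
    simp [List.filter_cons, PySem.Dict.contains_eq_decide_mem_keys, h1, h2, h3, h4]

theorem valA_branch (d : PySem.Dict String String) :
    ((["BRANCH", "branch", "GIT_BRANCH", "git_branch"].filter
        (fun k => d.contains k)).head?).bind d.get? =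
      (match pvM "target_branch" d.keys with
       | some kr => d.get? kr.1
       | none => none) := by
  rw [pvM_branch]
  by_cases h1 : "BRANCH" ∈ d.keys <;> by_cases h2 : "branch" ∈ d.keys <;>
    by_cases h3 : "GIT_BRANCH" ∈ d.keys <;> by_cases h4 : "git_branch" ∈ d.keys <;>
    simp [List.filter_cons, PySem.Dict.contains_eq_decide_mem_keys, h1, h2, h3, h4]

theorem valA_suite (d : PySem.Dict String String) :
    ((["TEST_SUITE", "test_suite", "SUITE"].filter
        (fun k => d.contains k)).head?).bind d.get? =
      (match pvM "test_suite" d.keys with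
       | some kr => d.get? kr.1
       | none => none) := by
  rw [pvM_suite]
  by_cases h1 : "TEST_SUITE" ∈ d.keys <;> by_cases h2 : "test_suite" ∈ d.keys <;>
    by_cases h3 : "SUITE" ∈ d.keys <;>
    simp [List.filter_cons, PySem.Dict.contains_eq_decide_mem_keys, h1, h2, h3]

theorem A_items (parameters : List (String × String)) :
    extract_environment_info_py parameters =
      [("cluster_name", ((["CLUSTER_NAME", "cluster", "environment", "ENVIRONMENT"].filter
          (fun k => (PySem.Dict.ofList parameters).contains k)).head?).bind (PySem.Dict.ofList parameters).get?),
       ("environment_type", none),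
       ("target_branch", ((["BRANCH", "branch", "GIT_BRANCH", "git_branch"].filter
          (fun k => (PySem.Dict.ofList parameters).contains k)).head?).bind (PySem.Dict.ofList parameters).get?),
       ("test_suite", ((["TEST_SUITE", "test_suite", "SUITE"].filter
          (fun k => (PySem.Dict.ofList parameters).contains k)).head?).bind (PySem.Dict.ofList parameters).get?)] := by
  unfold extract_environment_info_py
  simp only [pvLoopA_eq]
  rcases h1 : (["CLUSTER_NAME", "cluster", "environment", "ENVIRONMENT"].filter
      (fun k => (PySem.Dict.ofList parameters).contains k)).head? with _ | k1 <;>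
  rcases h2 : (["BRANCH", "branch", "GIT_BRANCH", "git_branch"].filter
      (fun k => (PySem.Dict.ofList parameters).contains k)).head? with _ | k2 <;>
  rcases h3 : (["TEST_SUITE", "test_suite", "SUITE"].filter
      (fun k => (PySem.Dict.ofList parameters).contains k)).head? with _ | k3 <;>
  · simp only [h1, h2, h3, Option.bind_none, Option.bind_some]; rfl

theorem B_items (parameters : List (String × String)) :
    extract_environment_info_py_alt parameters =
      [("cluster_name", (match pvM "cluster_name" (PySem.Dict.ofList parameters).keys with
         | some kr => (PySem.Dict.ofList parameters).get? kr.1 | none => none)),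
       ("environment_type", (match pvM "environment_type" (PySem.Dict.ofList parameters).keys with
         | some kr => (PySem.Dict.ofList parameters).get? kr.1 | none => none)),
       ("target_branch", (match pvM "target_branch" (PySem.Dict.ofList parameters).keys with
         | some kr => (PySem.Dict.ofList parameters).get? kr.1 | none => none)),
       ("test_suite", (match pvM "test_suite" (PySem.Dict.ofList parameters).keys with
         | some kr => (PySem.Dict.ofList parameters).get? kr.1 | none => none))] := by
  unfold extract_environment_info_py_alt
  simp only [List.map, foldBest_get, PySem.Dict.get?_empty, pvMerge_none_left]

-- ===== VERDICT (by name: the statement is the Claim_ definition above) =====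
theorem extract_environment_info_py_spec : Claim_equal_extract_environment_info_py := by
  intro parameters _
  show extract_environment_info_py parameters = extract_environment_info_py_alt parameters
  rw [A_items, B_items, valA_cluster, valA_branch, valA_suite, pvM_envtype]
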